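-- pv_equiv track=rewrite | github.com/Qbanxiaoxu/NaturalLanguageProcessingExperiment | 实验三/prf.py | to_region
-- ===== SOURCE A (Python) =====
-- def to_region(lst):
--     region = []
--     start = 0
--     for word in lst:
--         end = start + len(word)
--         region.append((start, end))
--         start = end
--     return region
-- ===== SOURCE B (Python) =====
-- def to_region(lst):
--     offs = [0]
--     for w in lst:
--         offs.append(offs[-1] + len(w))
--     return [(offs[i], offs[i + 1]) for i in range(len(lst))]
-- ===== Notes on version B (the rewrite author's own statement) =====
-- stated objective: alternative
-- what changed: B works in two staged passes: it first materializes the full prefix-sum offsets table offs, then pairs adjacent table entries (offs[i], offs[i+1]) by index, instead of A's single loop threading a running start and appending pairs as it goes.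
import Mathlib
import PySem

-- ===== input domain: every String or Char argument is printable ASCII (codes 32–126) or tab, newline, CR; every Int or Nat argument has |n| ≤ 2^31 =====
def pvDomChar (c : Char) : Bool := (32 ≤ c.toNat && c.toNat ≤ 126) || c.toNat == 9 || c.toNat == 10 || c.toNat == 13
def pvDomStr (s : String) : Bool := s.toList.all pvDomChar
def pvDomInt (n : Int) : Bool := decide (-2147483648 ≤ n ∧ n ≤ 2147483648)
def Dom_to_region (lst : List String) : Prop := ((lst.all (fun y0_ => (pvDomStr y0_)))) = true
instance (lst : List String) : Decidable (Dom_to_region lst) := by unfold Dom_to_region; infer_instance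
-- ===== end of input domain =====

-- B builds the full prefix-sum offsets table in a first pass, then pairs adjacent entries by index in a second pass (alternative decomposition, same cost).


-- ===== PORT A =====
-- one loop threading (region, start); appends (start, end) each step
def to_region (lst : List String) : List (Int × Int) :=
  (lst.foldl (fun (st : List (Int × Int) × Int) word =>
      let e := st.2 + PySem.Str.len word
      (st.1 ++ [(st.2, e)], e))
    ([], 0)).1

-- ===== PORT B =====
-- pass 1: offs starts as [0]; each word appends offs[-1] + len(w).
--   offs is always nonempty, so Python's offs[-1] is exactly getLastD _ 0.
-- pass 2: [(offs[i], offs[i+1]) for i in range(len(lst))].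
--   offs has length len(lst)+1, so both indices are in range; getD _ _ 0 is exact there.
def to_region_alt (lst : List String) : List (Int × Int) :=
  let offs : List Int :=
    lst.foldl (fun acc w => acc ++ [acc.getLastD 0 + PySem.Str.len w]) [0]
  (List.range lst.length).map (fun i => (offs.getD i 0, offs.getD (i + 1) 0))

-- ===== PRECONDITION & SPEC =====
def Spec_to_region (lst : List String) (out : List (Int × Int)) : Prop := out = to_region_alt lst
instance (lst : List String) (out : List (Int × Int)) : Decidable (Spec_to_region lst out) := by unfold Spec_to_region; infer_instance

-- ===== CLAIM (what is proved, stated in full; the proofs are below) =====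
def Claim_equal_to_region : Prop := ∀ (lst : List String), Dom_to_region lst → Spec_to_region lst (to_region lst)

-- ===== LEMMAS AND PROOFS =====

-- canonical list of spans starting at offset s (A's semantics)
def spans (s : Int) : List String → List (Int × Int)
  | [] => []
  | w :: ws => (s, s + PySem.Str.len w) :: spans (s + PySem.Str.len w) ws

-- canonical tail of the offsets table after offset s (B's first pass, semantics)
def tailOffs (s : Int) : List String → List Int
  | [] => []
  | w :: ws => (s + PySem.Str.len w) :: tailOffs (s + PySem.Str.len w) ws

theorem foldA_eq (lst : List String) (acc : List (Int × Int)) (s : Int) :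
    (lst.foldl (fun (st : List (Int × Int) × Int) word =>
        let e := st.2 + PySem.Str.len word
        (st.1 ++ [(st.2, e)], e)) (acc, s)).1 = acc ++ spans s lst := by
  induction lst generalizing acc s with
  | nil => simp [spans]
  | cons w ws ih =>
    simp only [List.foldl_cons]
    exact (ih (acc ++ [(s, s + PySem.Str.len w)]) (s + PySem.Str.len w)).trans
      (by simp [spans, List.append_assoc])

theorem foldB_eq (lst : List String) (acc : List Int) (s : Int)
    (h : acc.getLastD 0 = s) :
    lst.foldl (fun acc w => acc ++ [acc.getLastD 0 + PySem.Str.len w]) acc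
      = acc ++ tailOffs s lst := by
  induction lst generalizing acc s with
  | nil => simp [tailOffs]
  | cons w ws ih =>
    simp only [List.foldl_cons, h]
    exact (ih (acc ++ [s + PySem.Str.len w]) (s + PySem.Str.len w) (by simp)).trans
      (by simp [tailOffs, List.append_assoc])

theorem map_index_offs (lst : List String) (s : Int) :
    (List.range lst.length).map
        (fun i => ((s :: tailOffs s lst).getD i 0, (s :: tailOffs s lst).getD (i + 1) 0))
      = spans s lst := by
  induction lst generalizing s with
  | nil => simp [spans]
  | cons w ws ih =>
    simp only [List.length_cons, List.range_succ_eq_map, List.map_cons, List.map_map]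
    refine congrArg₂ List.cons (by simp [tailOffs]) ?_
    have := ih (s + PySem.Str.len w)
    simpa [tailOffs, Function.comp, spans] using this

-- ===== VERDICT (by name: the statement is the Claim_ definition above) =====
theorem to_region_spec : Claim_equal_to_region := by
  intro lst _
  unfold Spec_to_region to_region to_region_alt
  rw [foldA_eq, foldB_eq lst [0] 0 (by simp)]
  simpa using (map_index_offs lst 0).symm
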